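-- pv_equiv track=rewrite | github.com/dontmesswitmatthewdagreat-lang/HockeyQuant | NHL_Moneyline_Generator_APP_Phase3.py | get_team_relationship
-- ===== SOURCE A (Python) =====
-- NHL_DIVISIONS = {
--     'Atlantic': ['BOS', 'BUF', 'DET', 'FLA', 'MTL', 'OTT', 'TBL', 'TOR'],
--     'Metropolitan': ['CAR', 'CBJ', 'NJD', 'NYI', 'NYR', 'PHI', 'PIT', 'WSH'],
--     'Central': ['CHI', 'COL', 'DAL', 'MIN', 'NSH', 'STL', 'WPG', 'UTA'],
--     'Pacific': ['ANA', 'CGY', 'EDM', 'LAK', 'SJS', 'SEA', 'VAN', 'VGK'],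
-- }
--
-- NHL_CONFERENCES = {
--     'Eastern': ['Atlantic', 'Metropolitan'],
--     'Western': ['Central', 'Pacific'],
-- }
--
-- def get_team_relationship(team1, team2):
--     team1_div = team2_div = None
--     team1_conf = team2_conf = None
--     for div, teams in NHL_DIVISIONS.items():
--         if team1 in teams:
--             team1_div = div
--         if team2 in teams:
--             team2_div = div
--     for conf, divs in NHL_CONFERENCES.items():
--         if team1_div in divs:
--             team1_conf = conf
--         if team2_div in divs:
--             team2_conf = conf
--     if team1_div == team2_div:
--         return 'same_division', 8
--     elif team1_conf == team2_conf:
--         return 'same_conference', 6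
--     else:
--         return 'different_conference', 4
-- ===== SOURCE B (Python) =====
-- # One flat ordered roster: position encodes everything. Division = index//8,
-- # conference = index//16 (rosters are listed division by division, 8 teams each,
-- # Eastern divisions first). Unknown teams get index -1, so two unknown teams
-- # share "division" -1 (matching None == None) and an unknown never shares a
-- # division or conference with a known team.
-- ALL_TEAMS = [
--     'BOS', 'BUF', 'DET', 'FLA', 'MTL', 'OTT', 'TBL', 'TOR',
--     'CAR', 'CBJ', 'NJD', 'NYI', 'NYR', 'PHI', 'PIT', 'WSH',
--     'CHI', 'COL', 'DAL', 'MIN', 'NSH', 'STL', 'WPG', 'UTA',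
--     'ANA', 'CGY', 'EDM', 'LAK', 'SJS', 'SEA', 'VAN', 'VGK',
-- ]
--
-- def _team_index(team):
--     try:
--         return ALL_TEAMS.index(team)
--     except ValueError:
--         return -1
--
-- def get_team_relationship(team1, team2):
--     i1 = _team_index(team1)
--     i2 = _team_index(team2)
--     if i1 // 8 == i2 // 8:
--         return 'same_division', 8
--     if i1 // 16 == i2 // 16:
--         return 'same_conference', 6
--     return 'different_conference', 4
-- ===== Notes on version B (the rewrite author's own statement) =====
-- stated objective: alternative
-- what changed: Replaces the two label-propagating scans (team->division name, division name->conference name) with a single flat 32-team roster whose index arithmetically encodes both groupings: division = index//8, conference = index//16, unknown = -1.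
import Mathlib
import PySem

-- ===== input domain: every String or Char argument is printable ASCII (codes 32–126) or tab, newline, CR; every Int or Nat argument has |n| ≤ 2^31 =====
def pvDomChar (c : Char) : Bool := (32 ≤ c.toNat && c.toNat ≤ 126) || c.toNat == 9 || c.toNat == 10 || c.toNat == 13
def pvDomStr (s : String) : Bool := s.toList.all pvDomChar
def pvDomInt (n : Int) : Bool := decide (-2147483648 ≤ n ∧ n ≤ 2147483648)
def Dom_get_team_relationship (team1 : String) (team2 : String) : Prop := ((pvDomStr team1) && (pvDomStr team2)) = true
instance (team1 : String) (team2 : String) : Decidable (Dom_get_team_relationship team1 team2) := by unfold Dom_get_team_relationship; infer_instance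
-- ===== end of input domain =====

-- B drops the two label-propagating scans of A for a single flat 32-team roster whose index arithmetically encodes both groupings (division = index//8, conference = index//16, unknown = -1); same return value on all inputs.
-- ===== PORT A =====
def nhlDivisions : List (String × List String) := [("Atlantic", ["BOS", "BUF", "DET", "FLA", "MTL", "OTT", "TBL", "TOR"]), ("Metropolitan", ["CAR", "CBJ", "NJD", "NYI", "NYR", "PHI", "PIT", "WSH"]), ("Central", ["CHI", "COL", "DAL", "MIN", "NSH", "STL", "WPG", "UTA"]), ("Pacific", ["ANA", "CGY", "EDM", "LAK", "SJS", "SEA", "VAN", "VGK"])]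

def nhlConferences : List (String × List String) := [("Eastern", ["Atlantic", "Metropolitan"]), ("Western", ["Central", "Pacific"])]

def get_team_relationship (team1 : String) (team2 : String) : String × Int :=
  -- first loop: for div, teams in NHL_DIVISIONS.items(): if teamN in teams: teamN_div = div
  let ds : Option String × Option String :=
    nhlDivisions.foldl (fun s p =>
      ((if p.2.contains team1 then some p.1 else s.1),
       (if p.2.contains team2 then some p.1 else s.2))) (none, none)
  -- second loop: for conf, divs in NHL_CONFERENCES.items(): if teamN_div in divs: teamN_conf = conf
  let cs : Option String × Option String :=
    nhlConferences.foldl (fun s p =>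
      ((if ds.1.any (fun d => p.2.contains d) then some p.1 else s.1),
       (if ds.2.any (fun d => p.2.contains d) then some p.1 else s.2))) (none, none)
  if ds.1 = ds.2 then ("same_division", 8)
  else if cs.1 = cs.2 then ("same_conference", 6)
  else ("different_conference", 4)

-- ===== PORT B =====
def allTeams : List String := ["BOS", "BUF", "DET", "FLA", "MTL", "OTT", "TBL", "TOR", "CAR", "CBJ", "NJD", "NYI", "NYR", "PHI", "PIT", "WSH", "CHI", "COL", "DAL", "MIN", "NSH", "STL", "WPG", "UTA", "ANA", "CGY", "EDM", "LAK", "SJS", "SEA", "VAN", "VGK"]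

-- _team_index: ALL_TEAMS.index(team), -1 on ValueError
def teamIndex (team : String) : Int :=
  match PySem.List.index? allTeams team with
  | some n => (n : Int)
  | none => -1

def get_team_relationship_alt (team1 : String) (team2 : String) : String × Int :=
  let i1 := teamIndex team1
  let i2 := teamIndex team2
  if PySem.Int.floordiv i1 8 = PySem.Int.floordiv i2 8 then ("same_division", 8)
  else if PySem.Int.floordiv i1 16 = PySem.Int.floordiv i2 16 then ("same_conference", 6)
  else ("different_conference", 4)

-- ===== PRECONDITION & SPEC =====
def Spec_get_team_relationship (team1 : String) (team2 : String) (out : String × Int) : Prop := out = get_team_relationship_alt team1 team2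
instance (team1 : String) (team2 : String) (out : String × Int) : Decidable (Spec_get_team_relationship team1 team2 out) := by unfold Spec_get_team_relationship; infer_instance

-- ===== CLAIM (what is proved, stated in full; the proofs are below) =====
def Claim_equal_get_team_relationship : Prop := ∀ (team1 : String) (team2 : String), Dom_get_team_relationship team1 team2 → Spec_get_team_relationship team1 team2 (get_team_relationship team1 team2)

-- ===== LEMMAS AND PROOFS =====
-- A's division loop, run for a single team.
def divScan (t : String) : Option String :=
  nhlDivisions.foldl (fun s p => if p.2.contains t then some p.1 else s) none

-- A's conference loop, run for a single (possibly absent) division.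
def confScan (d : Option String) : Option String :=
  nhlConferences.foldl (fun s p => if d.any (fun x => p.2.contains x) then some p.1 else s) none

-- the paired folds of A are the single-team scans, componentwise
lemma divScan_pair (t1 t2 : String) :
    nhlDivisions.foldl (fun (s : Option String × Option String) p =>
      ((if p.2.contains t1 then some p.1 else s.1),
       (if p.2.contains t2 then some p.1 else s.2))) (none, none) = (divScan t1, divScan t2) := by
  simp [nhlDivisions, divScan, List.foldl]

lemma confScan_pair (d1 d2 : Option String) :
    nhlConferences.foldl (fun (s : Option String × Option String) p =>
      ((if d1.any (fun d => p.2.contains d) then some p.1 else s.1),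
       (if d2.any (fun d => p.2.contains d) then some p.1 else s.2))) (none, none) = (confScan d1, confScan d2) := by
  simp [nhlConferences, confScan, List.foldl]

-- the division A's scan assigns to a team, expressed as a function of B's roster index
def divCode (i : Int) : Option String :=
  if i < 0 then none
  else if i < 8 then some "Atlantic"
  else if i < 16 then some "Metropolitan"
  else if i < 24 then some "Central"
  else some "Pacific"

-- the conference A's scan assigns, as a function of the roster index
def confCode (i : Int) : Option String :=
  if i < 0 then none
  else if i < 16 then some "Eastern"
  else some "Western"

lemma char_teamIndex (t : String) :
    divScan t = divCode (teamIndex t) ∧ (teamIndex t = -1 ∨ (0 ≤ teamIndex t ∧ teamIndex t < 32)) := by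
  by_cases h0 : t = "BOS";  · subst h0; decide
  by_cases h1 : t = "BUF";  · subst h1; decide
  by_cases h2 : t = "DET";  · subst h2; decide
  by_cases h3 : t = "FLA";  · subst h3; decide
  by_cases h4 : t = "MTL";  · subst h4; decide
  by_cases h5 : t = "OTT";  · subst h5; decide
  by_cases h6 : t = "TBL";  · subst h6; decide
  by_cases h7 : t = "TOR";  · subst h7; decide
  by_cases h8 : t = "CAR";  · subst h8; decide
  by_cases h9 : t = "CBJ";  · subst h9; decide
  by_cases h10 : t = "NJD"; · subst h10; decide
  by_cases h11 : t = "NYI"; · subst h11; decide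
  by_cases h12 : t = "NYR"; · subst h12; decide
  by_cases h13 : t = "PHI"; · subst h13; decide
  by_cases h14 : t = "PIT"; · subst h14; decide
  by_cases h15 : t = "WSH"; · subst h15; decide
  by_cases h16 : t = "CHI"; · subst h16; decide
  by_cases h17 : t = "COL"; · subst h17; decide
  by_cases h18 : t = "DAL"; · subst h18; decide
  by_cases h19 : t = "MIN"; · subst h19; decide
  by_cases h20 : t = "NSH"; · subst h20; decide
  by_cases h21 : t = "STL"; · subst h21; decide
  by_cases h22 : t = "WPG"; · subst h22; decide
  by_cases h23 : t = "UTA"; · subst h23; decide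
  by_cases h24 : t = "ANA"; · subst h24; decide
  by_cases h25 : t = "CGY"; · subst h25; decide
  by_cases h26 : t = "EDM"; · subst h26; decide
  by_cases h27 : t = "LAK"; · subst h27; decide
  by_cases h28 : t = "SJS"; · subst h28; decide
  by_cases h29 : t = "SEA"; · subst h29; decide
  by_cases h30 : t = "VAN"; · subst h30; decide
  by_cases h31 : t = "VGK"; · subst h31; decide
  have hni : t ∉ allTeams := by
    simp [allTeams, h0, h1, h2, h3, h4, h5, h6, h7, h8, h9, h10, h11, h12, h13, h14, h15, h16, h17, h18, h19, h20, h21, h22, h23, h24, h25, h26, h27, h28, h29, h30, h31]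
  have hidx : teamIndex t = -1 := by
    unfold teamIndex
    rw [Iff.mpr (PySem.List.index?_eq_none_iff allTeams t) hni]
  constructor
  · rw [hidx]
    simp [divScan, nhlDivisions, List.foldl, divCode, h0, h1, h2, h3, h4, h5, h6, h7, h8, h9, h10, h11, h12, h13, h14, h15, h16, h17, h18, h19, h20, h21, h22, h23, h24, h25, h26, h27, h28, h29, h30, h31]
  · exact Or.inl hidx

lemma conf_char (i : Int) (_h : i = -1 ∨ (0 ≤ i ∧ i < 32)) :
    confScan (divCode i) = confCode i := by
  unfold divCode confCode
  split_ifs <;> first | decide | omega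

lemma div_iff (i1 i2 : Int) (h1 : i1 = -1 ∨ (0 ≤ i1 ∧ i1 < 32)) (h2 : i2 = -1 ∨ (0 ≤ i2 ∧ i2 < 32)) :
    (divCode i1 = divCode i2) ↔ (PySem.Int.floordiv i1 8 = PySem.Int.floordiv i2 8) := by
  rw [PySem.Int.floordiv_eq_ediv_of_pos (by norm_num), PySem.Int.floordiv_eq_ediv_of_pos (by norm_num)]
  unfold divCode
  split_ifs <;> simp <;> omega

lemma conf_iff (i1 i2 : Int) (h1 : i1 = -1 ∨ (0 ≤ i1 ∧ i1 < 32)) (h2 : i2 = -1 ∨ (0 ≤ i2 ∧ i2 < 32)) :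
    (confCode i1 = confCode i2) ↔ (PySem.Int.floordiv i1 16 = PySem.Int.floordiv i2 16) := by
  rw [PySem.Int.floordiv_eq_ediv_of_pos (by norm_num), PySem.Int.floordiv_eq_ediv_of_pos (by norm_num)]
  unfold confCode
  split_ifs <;> simp <;> omega

-- ===== VERDICT (by name: the statement is the Claim_ definition above) =====
theorem get_team_relationship_spec : Claim_equal_get_team_relationship := by
  intro t1 t2 _
  unfold Spec_get_team_relationship get_team_relationship get_team_relationship_alt
  simp only [divScan_pair]
  simp only [confScan_pair]
  obtain ⟨e1, r1⟩ := char_teamIndex t1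
  obtain ⟨e2, r2⟩ := char_teamIndex t2
  rw [e1, e2, conf_char _ r1, conf_char _ r2]
  simp only [div_iff _ _ r1 r2, conf_iff _ _ r1 r2]
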